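-- pv_equiv track=rewrite | github.com/oornnery/pjx | src/pjx/parser.py | _find_tag_end
-- ===== SOURCE A (Python) =====
-- def _find_tag_end(html: str, start: int) -> int:
--     """Find the closing ``>`` of an HTML tag, respecting quotes and ``{% %}`` blocks.
--
--     Args:
--         html: Full HTML source.
--         start: Index of the opening ``<``.
--
--     Returns:
--         Index of the closing ``>`` or ``-1`` if not found.
--     """
--     i = start + 1
--     in_single = False
--     in_double = False
--     in_jinja = False
--     while i < len(html):
--         if in_jinja:
--             if html[i : i + 2] == "%}":
--                 in_jinja = False
--                 i += 2
--                 continue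
--         elif in_single:
--             if html[i] == "'":
--                 in_single = False
--         elif in_double:
--             if html[i] == '"':
--                 in_double = False
--         elif html[i : i + 2] == "{%":
--             in_jinja = True
--             i += 2
--             continue
--         elif html[i] == "'":
--             in_single = True
--         elif html[i] == '"':
--             in_double = True
--         elif html[i] == ">":
--             return i
--         i += 1
--     return -1
-- ===== SOURCE B (Python) =====
-- def _best(a, b):
--     """The smaller of two str.find results, treating -1 as 'not found'."""
--     if a == -1:
--         return b
--     if b == -1:
--         return a
--     return a if a < b else b
--
--
-- def _find_tag_end(html: str, start: int) -> int:
--     """Find the closing ``>`` of an HTML tag, respecting quotes and ``{% %}`` blocks.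
--
--     Jump scan: instead of walking one character at a time, repeatedly locate the
--     nearest interesting position (quote, ``>`` or ``{%``) with str.find and hop
--     straight over quoted strings and ``{% %}`` blocks to their closers.
--     """
--     i = start + 1
--     while True:
--         ps = html.find("'", i)
--         pd = html.find('"', i)
--         pg = html.find('>', i)
--         pj = html.find('{%', i)
--         p = _best(_best(ps, pd), _best(pg, pj))
--         if p == -1:
--             return -1
--         if p == pg:
--             return p
--         if p == pj:
--             close = html.find('%}', p + 2)
--             if close == -1:
--                 return -1
--             i = close + 2
--         else:
--             close = html.find(html[p], p + 1)
--             if close == -1: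
--                 return -1
--             i = close + 1
-- ===== Notes on version B (the rewrite author's own statement) =====
-- stated objective: faster
-- what changed: Replaces the per-character state-machine scan with a jump loop that uses str.find to hop directly to the next quote/'>'/'{%' and to the matching closer, skipping quoted and jinja regions in one step.
-- outside the precondition, e.g. on _find_tag_end('a>', -2): A returns -1, B returns 1
import Mathlib
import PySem

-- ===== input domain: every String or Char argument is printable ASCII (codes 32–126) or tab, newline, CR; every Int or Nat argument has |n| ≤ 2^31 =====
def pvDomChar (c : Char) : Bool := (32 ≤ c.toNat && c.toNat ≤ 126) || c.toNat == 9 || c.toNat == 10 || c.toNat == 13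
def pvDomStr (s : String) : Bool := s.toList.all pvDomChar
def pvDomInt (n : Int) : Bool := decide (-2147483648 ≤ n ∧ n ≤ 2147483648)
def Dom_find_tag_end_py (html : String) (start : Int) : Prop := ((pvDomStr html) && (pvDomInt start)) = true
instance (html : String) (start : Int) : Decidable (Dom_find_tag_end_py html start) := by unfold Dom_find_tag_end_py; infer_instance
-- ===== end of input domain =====

-- B replaces A's per-character state machine by a jump loop built on str.find (equivalence proved for start ≥ -1,
-- the scans that begin at a non-negative index; for start < -1 A indexes with Python's negative-index wraparound).

-- ===== PORT A =====
-- literal transliteration of A's while loop; fuel (= len+1, enough for every scan starting at index ≥ 0) only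
-- totalizes the recursion, and `none` from pyGet? (Python's IndexError, impossible for 0 ≤ i < len) returns -1.
def find_tag_end_go (cs : List Char) : Nat → Int → Bool → Bool → Bool → Int
  | 0, _, _, _, _ => -1
  | fuel+1, i, insng, indbl, injnj =>
    if i < (cs.length : Int) then
      if injnj then
        if PySem.List.slice cs (some i) (some (i+2)) = ['%', '}'] then
          find_tag_end_go cs fuel (i+2) insng indbl false
        else find_tag_end_go cs fuel (i+1) insng indbl injnj
      else if insng then
        match PySem.List.pyGet? cs i with
        | none => -1
        | some c =>
          if c = '\'' then find_tag_end_go cs fuel (i+1) false indbl injnj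
          else find_tag_end_go cs fuel (i+1) insng indbl injnj
      else if indbl then
        match PySem.List.pyGet? cs i with
        | none => -1
        | some c =>
          if c = '"' then find_tag_end_go cs fuel (i+1) insng false injnj
          else find_tag_end_go cs fuel (i+1) insng indbl injnj
      else if PySem.List.slice cs (some i) (some (i+2)) = ['{', '%'] then
        find_tag_end_go cs fuel (i+2) insng indbl true
      else
        match PySem.List.pyGet? cs i with
        | none => -1
        | some c =>
          if c = '\'' then find_tag_end_go cs fuel (i+1) true indbl injnj
          else if c = '"' then find_tag_end_go cs fuel (i+1) insng true injnj
          else if c = '>' then i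
          else find_tag_end_go cs fuel (i+1) insng indbl injnj
    else -1

def find_tag_end_py (html : String) (start : Int) : Int :=
  find_tag_end_go html.toList (html.toList.length + 1) (start + 1) false false false

-- ===== PORT B =====
-- transliteration of Source B: _best = min of two find() results with -1 read as "not found"
def pvBest (a b : Int) : Int :=
  if a = -1 then b else if b = -1 then a else if a < b then a else b

def find_tag_end_alt_go (cs : List Char) : Nat → Int → Int
  | 0, _ => -1
  | fuel+1, i =>
    let ps := PySem.Chars.findFrom cs ['\''] i
    let pd := PySem.Chars.findFrom cs ['"'] i
    let pg := PySem.Chars.findFrom cs ['>'] i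
    let pj := PySem.Chars.findFrom cs ['{', '%'] i
    let p := pvBest (pvBest ps pd) (pvBest pg pj)
    if p = -1 then -1
    else if p = pg then p
    else if p = pj then
      let close := PySem.Chars.findFrom cs ['%', '}'] (p+2)
      if close = -1 then -1 else find_tag_end_alt_go cs fuel (close + 2)
    else
      match PySem.List.pyGet? cs p with
      | none => -1
      | some q =>
        let close := PySem.Chars.findFrom cs [q] (p+1)
        if close = -1 then -1 else find_tag_end_alt_go cs fuel (close + 1)

def find_tag_end_py_alt (html : String) (start : Int) : Int :=
  find_tag_end_alt_go html.toList (html.toList.length + 2) (start + 1)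

-- ===== PRECONDITION & SPEC =====
-- Pre_ excludes start < -1 (outside the function's natural domain — start is the index of the opening '<'):
-- there the scan begins at a negative index and A relies on Python's negative-index wraparound, returning an
-- accidental negative "found" index, or raising IndexError once start+1 < -len(html).
def Pre_find_tag_end_py (html : String) (start : Int) : Prop := -1 ≤ start
instance (html : String) (start : Int) : Decidable (Pre_find_tag_end_py html start) := by unfold Pre_find_tag_end_py; infer_instance

def pvWitness_find_tag_end_py : String × Int := ("<a href='x>y'>", 0)

def Spec_find_tag_end_py (html : String) (start : Int) (out : Int) : Prop := out = find_tag_end_py_alt html start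
instance (html : String) (start : Int) (out : Int) : Decidable (Spec_find_tag_end_py html start out) := by unfold Spec_find_tag_end_py; infer_instance

-- ===== CLAIM (what is proved, stated in full; the proofs are below) =====
def Claim_equal_find_tag_end_py : Prop := ∀ (html : String) (start : Int), Dom_find_tag_end_py html start → Pre_find_tag_end_py html start → Spec_find_tag_end_py html start (find_tag_end_py html start)


-- ===== LEMMAS AND PROOFS =====

-- find(sub, st) is -1 once st is past the end of the string
theorem pvFindPast (cs sub : List Char) (st : Int) (h : (cs.length : Int) < st) :
    PySem.Chars.findFrom cs sub st = -1 := by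
  simp only [PySem.Chars.findFrom]
  split_ifs with h1 h2 h3 <;> try rfl
  all_goals omega

theorem pvFindBounds (cs sub : List Char) (k : Nat) (hsub : sub ≠ []) (hk : k ≤ cs.length)
    (h : PySem.Chars.findFrom cs sub (k : Int) ≠ -1) :
    (k : Int) ≤ PySem.Chars.findFrom cs sub (k : Int) ∧
      PySem.Chars.findFrom cs sub (k : Int) < cs.length := by
  obtain ⟨h1, h2, -⟩ := PySem.Chars.findFrom_natCast_spec cs sub k hk h
  refine ⟨h1, ?_⟩
  by_contra hcon
  have hdrop : cs.drop (PySem.Chars.findFrom cs sub (k : Int)).toNat = [] := by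
    apply List.drop_eq_nil_of_le
    omega
  rw [hdrop] at h2
  exact hsub (List.prefix_nil.mp h2)

theorem pvFindStep (cs sub : List Char) (k : Nat) (hsub : sub ≠ []) (hk : k ≤ cs.length) :
    PySem.Chars.findFrom cs sub (k : Int) =
      if sub <+: cs.drop k then (k : Int) else PySem.Chars.findFrom cs sub ((k : Int) + 1) := by
  split_ifs with hp
  · -- hit at k
    have hne : PySem.Chars.findFrom cs sub (k : Int) ≠ -1 := by
      intro hc
      rw [PySem.Chars.findFrom_natCast_eq_neg_one_iff cs sub k hk] at hc
      exact hc hp.isInfix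
    obtain ⟨h1, h2, h3⟩ := PySem.Chars.findFrom_natCast_spec cs sub k hk hne
    by_contra hcon
    have hgt : k < (PySem.Chars.findFrom cs sub (k : Int)).toNat := by omega
    exact h3 k le_rfl hgt hp
  · -- no hit at k
    rcases Nat.eq_or_lt_of_le hk with heq | hlt
    · -- k = len
      subst heq
      rw [pvFindPast cs sub ((cs.length : Int) + 1) (by omega),
        PySem.Chars.findFrom_natCast_eq_neg_one_iff cs sub cs.length le_rfl]
      simp only [List.drop_length]
      rw [List.infix_nil]
      exact hsub
    · have hk1 : k + 1 ≤ cs.length := hlt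
      have hcast : ((k : Int) + 1) = ((k + 1 : Nat) : Int) := by push_cast; ring
      rw [hcast]
      have hinf : ∀ m : Nat, (sub <:+: cs.drop m ↔ ∃ j, sub <+: cs.drop (m + j)) := by
        intro m
        rw [← PySem.Chars.isIn_iff_infix, ← PySem.Chars.exists_prefix_drop_iff_isIn]
        constructor
        · rintro ⟨j, hj⟩; exact ⟨j, by rwa [List.drop_drop] at hj⟩
        · rintro ⟨j, hj⟩; exact ⟨j, by rwa [List.drop_drop]⟩
      by_cases hr : PySem.Chars.findFrom cs sub ((k+1 : Nat) : Int) = -1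
      · rw [hr]
        rw [PySem.Chars.findFrom_natCast_eq_neg_one_iff cs sub k hk]
        rw [PySem.Chars.findFrom_natCast_eq_neg_one_iff cs sub (k+1) hk1] at hr
        intro hcon
        apply hr
        rw [hinf] at hcon ⊢
        obtain ⟨j, hj⟩ := hcon
        rcases j with _ | j
        · rw [Nat.add_zero] at hj; exact absurd hj hp
        · exact ⟨j, by rwa [show k + (j + 1) = k + 1 + j by omega] at hj⟩
      · obtain ⟨h1, h2, h3⟩ := PySem.Chars.findFrom_natCast_spec cs sub (k+1) hk1 hr
        have hne : PySem.Chars.findFrom cs sub (k : Int) ≠ -1 := by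
          intro hcon
          rw [PySem.Chars.findFrom_natCast_eq_neg_one_iff cs sub k hk] at hcon
          apply hcon
          rw [hinf]
          refine ⟨(PySem.Chars.findFrom cs sub ((k+1 : Nat) : Int)).toNat - k, ?_⟩
          rwa [show k + ((PySem.Chars.findFrom cs sub ((k+1:Nat) : Int)).toNat - k) =
              (PySem.Chars.findFrom cs sub ((k+1:Nat) : Int)).toNat by omega]
        obtain ⟨g1, g2, g3⟩ := PySem.Chars.findFrom_natCast_spec cs sub k hk hne
        set r' := PySem.Chars.findFrom cs sub (k : Int) with hr'
        set r := PySem.Chars.findFrom cs sub ((k+1 : Nat) : Int) with hrr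
        have hner : r'.toNat ≠ k := by
          intro hcon; apply hp; rwa [hcon] at g2
        have hge : k + 1 ≤ r'.toNat := by omega
        have : r'.toNat = r.toNat := by
          rcases lt_trichotomy r'.toNat r.toNat with hlt' | heq' | hgt'
          · exact absurd g2 (h3 r'.toNat hge hlt')
          · exact heq'
          · exact absurd h2 (g3 r.toNat (by omega) hgt')
        omega

theorem pvSliceTwo (cs : List Char) (j : Nat) :
    PySem.List.slice cs (some (j : Int)) (some ((j : Int) + 2)) = (cs.drop j).take 2 := by
  simp only [PySem.List.slice, PySem.List.clampIdx]
  have h2 : ((j : Int) + 2) = ((j + 2 : Nat) : Int) := by push_cast; ring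
  rw [h2]
  simp only [Int.toNat_natCast]
  split_ifs with h1 h3 <;> try omega
  by_cases hle : j ≤ cs.length
  · by_cases hle2 : j + 2 ≤ cs.length
    · rw [Nat.min_eq_left hle, Nat.min_eq_left hle2]
      congr 1
      omega
    · rw [Nat.min_eq_left hle, Nat.min_eq_right (by omega)]
      rw [List.take_of_length_le (by simp only [List.length_drop]; omega), List.take_of_length_le (by simp only [List.length_drop]; omega)]
  · rw [Nat.min_eq_right (by omega), Nat.min_eq_right (by omega)]
    simp
    omega

-- html[j] for j < len
theorem pvGetAt (cs : List Char) (j : Nat) (hj : j < cs.length) :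
    PySem.List.pyGet? cs (j : Int) = some cs[j] := by
  rw [PySem.List.pyGet?_natCast]
  exact List.getElem?_eq_getElem hj

-- a one-character needle starts at j iff the character at j is it
theorem pvPrefixOne (cs : List Char) (c : Char) (j : Nat) (hj : j < cs.length) :
    ([c] <+: cs.drop j) ↔ cs[j] = c := by
  rw [List.drop_eq_getElem_cons hj, List.cons_prefix_cons]
  simp [List.nil_prefix, eq_comm]

-- the slice test html[j:j+2] == ab is the two-character-prefix test at j
theorem pvSliceEq (cs : List Char) (a b : Char) (j : Nat) :
    (PySem.List.slice cs (some (j : Int)) (some ((j : Int) + 2)) = [a, b]) ↔ [a, b] <+: cs.drop j := by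
  rw [pvSliceTwo, List.prefix_iff_eq_take]
  constructor <;> intro h <;> simp_all

-- find at or past the end of the string fails
theorem pvFindPastLen (cs sub : List Char) (j : Nat) (hsub : sub ≠ []) (hj : cs.length ≤ j) :
    PySem.Chars.findFrom cs sub (j : Int) = -1 := by
  rcases Nat.eq_or_lt_of_le hj with heq | hlt
  · rw [← heq, pvFindStep cs sub cs.length hsub le_rfl]
    rw [if_neg (by simp [List.drop_length]; intro h; simp_all)]
    exact pvFindPast cs sub _ (by omega)
  · exact pvFindPast cs sub _ (by omega)

-- find hits exactly at j
theorem pvFindAt (cs sub : List Char) (j : Nat) (hsub : sub ≠ []) (hj : j ≤ cs.length)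
    (hp : sub <+: cs.drop j) :
    PySem.Chars.findFrom cs sub (j : Int) = (j : Int) := by
  rw [pvFindStep cs sub j hsub hj, if_pos hp]

-- a find that does not hit at j is either a failure or a hit strictly after j
theorem pvNotAt (cs sub : List Char) (j : Nat) (hsub : sub ≠ []) (hj : j < cs.length)
    (hnp : ¬ sub <+: cs.drop j) :
    PySem.Chars.findFrom cs sub (j : Int) = -1 ∨ (j : Int) < PySem.Chars.findFrom cs sub (j : Int) := by
  by_cases h : PySem.Chars.findFrom cs sub (j : Int) = -1
  · exact Or.inl h
  · right
    rw [pvFindStep cs sub j hsub (le_of_lt hj), if_neg hnp] at h ⊢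
    have hcast : ((j : Int) + 1) = ((j + 1 : Nat) : Int) := by push_cast; ring
    rw [hcast] at h ⊢
    have := (pvFindBounds cs sub (j+1) hsub (by omega) h).1
    omega

-- skipping a position where the needle does not start
theorem pvFindSkip (cs sub : List Char) (j : Nat) (hsub : sub ≠ []) (hj : j < cs.length)
    (hnp : ¬ sub <+: cs.drop j) :
    PySem.Chars.findFrom cs sub (j : Int) = PySem.Chars.findFrom cs sub ((j : Int) + 1) := by
  rw [pvFindStep cs sub j hsub (le_of_lt hj), if_neg hnp]

-- min-of-found helpers for Source B's _best tree: the slot holding j wins when the others miss or hit later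
theorem pvBest1 (b c d : Int) (j : Nat) (hb : b = -1 ∨ (j : Int) < b) (hc : c = -1 ∨ (j : Int) < c)
    (hd : d = -1 ∨ (j : Int) < d) : pvBest (pvBest (j : Int) b) (pvBest c d) = (j : Int) := by
  have hj : (0:Int) ≤ (j : Int) := by omega
  rcases hb with hb | hb <;> rcases hc with hc | hc <;> rcases hd with hd | hd <;>
    simp only [pvBest] <;> split_ifs <;> first | exact ‹False›.elim | omega

theorem pvBest3 (a b d : Int) (j : Nat) (ha : a = -1 ∨ (j : Int) < a) (hb : b = -1 ∨ (j : Int) < b)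
    (hd : d = -1 ∨ (j : Int) < d) : pvBest (pvBest a b) (pvBest (j : Int) d) = (j : Int) := by
  have hj : (0:Int) ≤ (j : Int) := by omega
  rcases ha with ha | ha <;> rcases hb with hb | hb <;> rcases hd with hd | hd <;>
    simp only [pvBest] <;> split_ifs <;> first | exact ‹False›.elim | omega

theorem pvBest4 (a b c : Int) (j : Nat) (ha : a = -1 ∨ (j : Int) < a) (hb : b = -1 ∨ (j : Int) < b)
    (hc : c = -1 ∨ (j : Int) < c) : pvBest (pvBest a b) (pvBest c (j : Int)) = (j : Int) := by
  have hj : (0:Int) ≤ (j : Int) := by omega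
  rcases ha with ha | ha <;> rcases hb with hb | hb <;> rcases hc with hc | hc <;>
    simp only [pvBest] <;> split_ifs <;> first | exact ‹False›.elim | omega

-- A's loop returns -1 once the index is past the end, whatever the state and fuel
theorem pvAbase (cs : List Char) (fa : Nat) (j : Nat) (s d jj : Bool) (hj : cs.length ≤ j) :
    find_tag_end_go cs fa (j : Int) s d jj = -1 := by
  cases fa with
  | zero => rfl
  | succ fa => simp only [find_tag_end_go]; rw [if_neg (by omega)]

-- B's loop returns -1 once the index is at or past the end
theorem pvBbase (cs : List Char) (fb : Nat) (j : Nat) (hj : cs.length ≤ j) :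
    find_tag_end_alt_go cs fb (j : Int) = -1 := by
  cases fb with
  | zero => rfl
  | succ fb =>
    simp only [find_tag_end_alt_go]
    rw [pvFindPastLen cs _ j (by simp) hj, pvFindPastLen cs _ j (by simp) hj,
      pvFindPastLen cs _ j (by simp) hj, pvFindPastLen cs _ j (by simp) hj]
    rfl

-- A's loop does not depend on the fuel once the fuel covers the remaining positions
theorem pvAIrrel (cs : List Char) (f : Nat) : ∀ (g j : Nat) (s d jj : Bool),
    cs.length ≤ j + f → cs.length ≤ j + g →
    find_tag_end_go cs f (j : Int) s d jj = find_tag_end_go cs g (j : Int) s d jj := by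
  induction f with
  | zero =>
    intro g j s d jj hf hg
    rw [pvAbase cs 0 j s d jj (by omega), pvAbase cs g j s d jj (by omega)]
  | succ f ih =>
    intro g j s d jj hf hg
    by_cases hjl : j < cs.length
    · cases g with
      | zero => omega
      | succ g =>
        have e1 : ((j : Int) + 1) = ((j + 1 : Nat) : Int) := by push_cast; ring
        have e2 : ((j : Int) + 2) = ((j + 2 : Nat) : Int) := by push_cast; ring
        simp only [find_tag_end_go]
        rw [if_pos (by omega : (j : Int) < (cs.length : Int)),
          if_pos (by omega : (j : Int) < (cs.length : Int))]
        rw [e1, e2]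
        rcases hpg : PySem.List.pyGet? cs (j : Int) with _ | c <;>
          (try dsimp only []) <;> split_ifs <;>
          first
          | rfl
          | (apply ih <;> omega)
    · rw [pvAbase cs (f+1) j s d jj (by omega), pvAbase cs g j s d jj (by omega)]

theorem pvBest2 (a c d : Int) (j : Nat) (ha : a = -1 ∨ (j : Int) < a) (hc : c = -1 ∨ (j : Int) < c)
    (hd : d = -1 ∨ (j : Int) < d) : pvBest (pvBest a (j : Int)) (pvBest c d) = (j : Int) := by
  have hj : (0:Int) ≤ (j : Int) := by omega
  rcases ha with ha | ha <;> rcases hc with hc | hc <;> rcases hd with hd | hd <;>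
    simp only [pvBest] <;> split_ifs <;> first | exact ‹False›.elim | omega

-- a one-character needle does not start at j when the character there is different
theorem pvNotOne (cs : List Char) (j : Nat) (hjl : j < cs.length) (c' : Char)
    (hne : cs[j] ≠ c') : ¬ [c'] <+: cs.drop j :=
  fun hp => hne ((pvPrefixOne cs c' j hjl).mp hp)

-- A inside a single-quoted region: scan to the closing quote, then resume the normal state
theorem pvASingle (cs : List Char) (f : Nat) : ∀ (j : Nat), cs.length ≤ j + f →
    find_tag_end_go cs f (j : Int) true false false =
      (if PySem.Chars.findFrom cs ['\''] (j : Int) = -1 then -1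
       else find_tag_end_go cs f (PySem.Chars.findFrom cs ['\''] (j : Int) + 1) false false false) := by
  induction f with
  | zero =>
    intro j hf
    rw [pvFindPastLen cs _ j (by simp) (by omega), if_pos rfl, pvAbase cs 0 j true false false (by omega)]
  | succ f ih =>
    intro j hf
    by_cases hjl : j < cs.length
    · have e1 : ((j : Int) + 1) = ((j + 1 : Nat) : Int) := by push_cast; ring
      conv_lhs => rw [find_tag_end_go]
      rw [if_pos (show (j:Int) < (cs.length:Int) by omega), if_neg Bool.false_ne_true, if_pos rfl,
        pvGetAt cs j hjl]
      dsimp only []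
      by_cases hc : cs[j] = '\''
      · rw [if_pos hc, pvFindAt cs ['\''] j (by simp) (by omega) ((pvPrefixOne cs '\'' j hjl).mpr hc)]
        rw [if_neg (show ¬((j:Int) = -1) by omega), e1]
        exact pvAIrrel cs f (f+1) (j+1) false false false (by omega) (by omega)
      · rw [if_neg hc, e1, ih (j+1) (by omega)]
        rw [pvFindSkip cs ['\''] j (by simp) hjl (pvNotOne cs j hjl '\'' hc), e1]
        by_cases hm : PySem.Chars.findFrom cs ['\''] ((j+1 : Nat) : Int) = -1
        · rw [if_pos hm, if_pos hm]
        · rw [if_neg hm, if_neg hm]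
          obtain ⟨hb1, hb2⟩ := pvFindBounds cs ['\''] (j+1) (by simp) (by omega) hm
          rw [show PySem.Chars.findFrom cs ['\''] ((j+1 : Nat) : Int) + 1 =
            (((PySem.Chars.findFrom cs ['\''] ((j+1 : Nat) : Int)).toNat + 1 : Nat) : Int) by omega]
          exact pvAIrrel cs f (f+1) _ false false false (by omega) (by omega)
    · rw [pvAbase cs (f+1) j true false false (by omega),
        pvFindPastLen cs _ j (by simp) (by omega), if_pos rfl]

-- A inside a double-quoted region
theorem pvADouble (cs : List Char) (f : Nat) : ∀ (j : Nat), cs.length ≤ j + f →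
    find_tag_end_go cs f (j : Int) false true false =
      (if PySem.Chars.findFrom cs ['"'] (j : Int) = -1 then -1
       else find_tag_end_go cs f (PySem.Chars.findFrom cs ['"'] (j : Int) + 1) false false false) := by
  induction f with
  | zero =>
    intro j hf
    rw [pvFindPastLen cs _ j (by simp) (by omega), if_pos rfl, pvAbase cs 0 j false true false (by omega)]
  | succ f ih =>
    intro j hf
    by_cases hjl : j < cs.length
    · have e1 : ((j : Int) + 1) = ((j + 1 : Nat) : Int) := by push_cast; ring
      conv_lhs => rw [find_tag_end_go]
      rw [if_pos (show (j:Int) < (cs.length:Int) by omega), if_neg Bool.false_ne_true,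
        if_neg Bool.false_ne_true, if_pos rfl, pvGetAt cs j hjl]
      dsimp only []
      by_cases hc : cs[j] = '"'
      · rw [if_pos hc, pvFindAt cs ['"'] j (by simp) (by omega) ((pvPrefixOne cs '"' j hjl).mpr hc)]
        rw [if_neg (show ¬((j:Int) = -1) by omega), e1]
        exact pvAIrrel cs f (f+1) (j+1) false false false (by omega) (by omega)
      · rw [if_neg hc, e1, ih (j+1) (by omega)]
        rw [pvFindSkip cs ['"'] j (by simp) hjl (pvNotOne cs j hjl '"' hc), e1]
        by_cases hm : PySem.Chars.findFrom cs ['"'] ((j+1 : Nat) : Int) = -1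
        · rw [if_pos hm, if_pos hm]
        · rw [if_neg hm, if_neg hm]
          obtain ⟨hb1, hb2⟩ := pvFindBounds cs ['"'] (j+1) (by simp) (by omega) hm
          rw [show PySem.Chars.findFrom cs ['"'] ((j+1 : Nat) : Int) + 1 =
            (((PySem.Chars.findFrom cs ['"'] ((j+1 : Nat) : Int)).toNat + 1 : Nat) : Int) by omega]
          exact pvAIrrel cs f (f+1) _ false false false (by omega) (by omega)
    · rw [pvAbase cs (f+1) j false true false (by omega),
        pvFindPastLen cs _ j (by simp) (by omega), if_pos rfl]

-- A inside a {% %} region: scan to "%}", step over it, resume the normal state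
theorem pvAJinja (cs : List Char) (f : Nat) : ∀ (j : Nat), cs.length ≤ j + f →
    find_tag_end_go cs f (j : Int) false false true =
      (if PySem.Chars.findFrom cs ['%', '}'] (j : Int) = -1 then -1
       else find_tag_end_go cs f (PySem.Chars.findFrom cs ['%', '}'] (j : Int) + 2) false false false) := by
  induction f with
  | zero =>
    intro j hf
    rw [pvFindPastLen cs _ j (by simp) (by omega), if_pos rfl, pvAbase cs 0 j false false true (by omega)]
  | succ f ih =>
    intro j hf
    by_cases hjl : j < cs.length
    · have e1 : ((j : Int) + 1) = ((j + 1 : Nat) : Int) := by push_cast; ring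
      have e2 : ((j : Int) + 2) = ((j + 2 : Nat) : Int) := by push_cast; ring
      conv_lhs => rw [find_tag_end_go]
      rw [if_pos (show (j:Int) < (cs.length:Int) by omega), if_pos rfl]
      by_cases hsl : PySem.List.slice cs (some (j : Int)) (some ((j : Int) + 2)) = ['%', '}']
      · have hp2 : ['%', '}'] <+: cs.drop j := (pvSliceEq cs '%' '}' j).mp hsl
        rw [if_pos hsl, pvFindAt cs ['%', '}'] j (by simp) (by omega) hp2]
        rw [if_neg (show ¬((j:Int) = -1) by omega), e2]
        exact pvAIrrel cs f (f+1) (j+2) false false false (by omega) (by omega)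
      · have hnp : ¬ ['%', '}'] <+: cs.drop j := fun hp => hsl ((pvSliceEq cs '%' '}' j).mpr hp)
        rw [if_neg hsl, e1, ih (j+1) (by omega)]
        rw [pvFindSkip cs ['%', '}'] j (by simp) hjl hnp, e1]
        by_cases hm : PySem.Chars.findFrom cs ['%', '}'] ((j+1 : Nat) : Int) = -1
        · rw [if_pos hm, if_pos hm]
        · rw [if_neg hm, if_neg hm]
          obtain ⟨hb1, hb2⟩ := pvFindBounds cs ['%', '}'] (j+1) (by simp) (by omega) hm
          rw [show PySem.Chars.findFrom cs ['%', '}'] ((j+1 : Nat) : Int) + 2 =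
            (((PySem.Chars.findFrom cs ['%', '}'] ((j+1 : Nat) : Int)).toNat + 2 : Nat) : Int) by omega]
          exact pvAIrrel cs f (f+1) _ false false false (by omega) (by omega)
    · rw [pvAbase cs (f+1) j false false true (by omega),
        pvFindPastLen cs _ j (by simp) (by omega), if_pos rfl]

-- B makes no progress on a position where no needle starts
theorem pvBskip (cs : List Char) (fb : Nat) (j : Nat) (hjl : j < cs.length)
    (h1 : ¬ ['\''] <+: cs.drop j) (h2 : ¬ ['"'] <+: cs.drop j) (h3 : ¬ ['>'] <+: cs.drop j)
    (h4 : ¬ ['{', '%'] <+: cs.drop j) :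
    find_tag_end_alt_go cs fb (j : Int) = find_tag_end_alt_go cs fb ((j + 1 : Nat) : Int) := by
  cases fb with
  | zero => rfl
  | succ fb =>
    have e1 : ((j : Int) + 1) = ((j + 1 : Nat) : Int) := by push_cast; ring
    simp only [find_tag_end_alt_go]
    rw [pvFindSkip cs ['\''] j (by simp) hjl h1, pvFindSkip cs ['"'] j (by simp) hjl h2,
      pvFindSkip cs ['>'] j (by simp) hjl h3, pvFindSkip cs ['{', '%'] j (by simp) hjl h4, e1]

-- main lemma: A's normal state at j equals B's jump loop at j
theorem pvMain (cs : List Char) (M : Nat) : ∀ (j fa fb : Nat),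
    cs.length + 2 - j ≤ M → cs.length ≤ j + fa → cs.length + 2 ≤ j + fb →
    find_tag_end_go cs fa (j : Int) false false false = find_tag_end_alt_go cs fb (j : Int) := by
  induction M with
  | zero =>
    intro j fa fb hM hfa hfb
    rw [pvAbase cs fa j false false false (by omega), pvBbase cs fb j (by omega)]
  | succ M ih =>
    intro j fa fb hM hfa hfb
    by_cases hjl : j < cs.length
    · obtain ⟨fa, rfl⟩ : ∃ fa', fa = fa' + 1 := ⟨fa - 1, by omega⟩
      obtain ⟨fb, rfl⟩ : ∃ fb', fb = fb' + 1 := ⟨fb - 1, by omega⟩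
      have e1 : ((j : Int) + 1) = ((j + 1 : Nat) : Int) := by push_cast; ring
      have e2 : ((j : Int) + 2) = ((j + 2 : Nat) : Int) := by push_cast; ring
      conv_lhs => rw [find_tag_end_go]
      rw [if_pos (show (j:Int) < (cs.length:Int) by omega), if_neg Bool.false_ne_true,
        if_neg Bool.false_ne_true, if_neg Bool.false_ne_true]
      by_cases hsl : PySem.List.slice cs (some (j : Int)) (some ((j : Int) + 2)) = ['{', '%']
      · -- a {% block starts at j
        have hp2 : ['{', '%'] <+: cs.drop j := (pvSliceEq cs '{' '%' j).mp hsl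
        have hlen2 : j + 2 ≤ cs.length := by
          have h2l := hp2.length_le
          simp only [List.length_drop, List.length_cons, List.length_nil] at h2l
          omega
        have hcj : cs[j] = '{' := by
          have h := hp2
          rw [List.drop_eq_getElem_cons hjl, List.cons_prefix_cons] at h
          exact h.1.symm
        have hps := pvNotAt cs ['\''] j (by simp) hjl (pvNotOne cs j hjl '\'' (by rw [hcj]; decide))
        have hpd := pvNotAt cs ['"'] j (by simp) hjl (pvNotOne cs j hjl '"' (by rw [hcj]; decide))
        have hpg := pvNotAt cs ['>'] j (by simp) hjl (pvNotOne cs j hjl '>' (by rw [hcj]; decide))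
        rw [if_pos hsl]
        simp only [find_tag_end_alt_go]
        rw [pvFindAt cs ['{', '%'] j (by simp) (by omega) hp2]
        rw [pvBest4 _ _ _ j hps hpd hpg]
        rw [if_neg (show ¬((j:Int) = -1) by omega)]
        rw [if_neg (show ¬((j:Int) = PySem.Chars.findFrom cs ['>'] (j:Int)) by
          rcases hpg with h | h <;> omega)]
        rw [if_pos rfl, e2, pvAJinja cs fa (j+2) (by omega)]
        by_cases hcl : PySem.Chars.findFrom cs ['%', '}'] ((j+2 : Nat) : Int) = -1
        · rw [if_pos hcl, if_pos hcl]
        · rw [if_neg hcl, if_neg hcl]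
          obtain ⟨hb1, hb2⟩ := pvFindBounds cs ['%', '}'] (j+2) (by simp) (by omega) hcl
          rw [show PySem.Chars.findFrom cs ['%', '}'] ((j+2 : Nat) : Int) + 2 =
            (((PySem.Chars.findFrom cs ['%', '}'] ((j+2 : Nat) : Int)).toNat + 2 : Nat) : Int) by omega]
          exact ih _ fa fb (by omega) (by omega) (by omega)
      · -- no {% at j: look at the character at j
        have hpjn : ¬ ['{', '%'] <+: cs.drop j := fun hp => hsl ((pvSliceEq cs '{' '%' j).mpr hp)
        have hpj := pvNotAt cs ['{', '%'] j (by simp) hjl hpjn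
        rw [if_neg hsl, pvGetAt cs j hjl]
        dsimp only []
        by_cases hq : cs[j] = '\''
        · -- a single quote opens at j
          have hpd := pvNotAt cs ['"'] j (by simp) hjl (pvNotOne cs j hjl '"' (by rw [hq]; decide))
          have hpg := pvNotAt cs ['>'] j (by simp) hjl (pvNotOne cs j hjl '>' (by rw [hq]; decide))
          rw [if_pos hq]
          simp only [find_tag_end_alt_go]
          rw [pvFindAt cs ['\''] j (by simp) (by omega) ((pvPrefixOne cs '\'' j hjl).mpr hq)]
          rw [pvBest1 _ _ _ j hpd hpg hpj]
          rw [if_neg (show ¬((j:Int) = -1) by omega)]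
          rw [if_neg (show ¬((j:Int) = PySem.Chars.findFrom cs ['>'] (j:Int)) by
            rcases hpg with h | h <;> omega)]
          rw [if_neg (show ¬((j:Int) = PySem.Chars.findFrom cs ['{', '%'] (j:Int)) by
            rcases hpj with h | h <;> omega)]
          rw [pvGetAt cs j hjl]
          dsimp only []
          rw [hq, e1, pvASingle cs fa (j+1) (by omega)]
          by_cases hcl : PySem.Chars.findFrom cs ['\''] ((j+1 : Nat) : Int) = -1
          · rw [if_pos hcl, if_pos hcl]
          · rw [if_neg hcl, if_neg hcl]
            obtain ⟨hb1, hb2⟩ := pvFindBounds cs ['\''] (j+1) (by simp) (by omega) hcl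
            rw [show PySem.Chars.findFrom cs ['\''] ((j+1 : Nat) : Int) + 1 =
              (((PySem.Chars.findFrom cs ['\''] ((j+1 : Nat) : Int)).toNat + 1 : Nat) : Int) by omega]
            exact ih _ fa fb (by omega) (by omega) (by omega)
        · by_cases hq2 : cs[j] = '"'
          · -- a double quote opens at j
            have hps := pvNotAt cs ['\''] j (by simp) hjl (pvNotOne cs j hjl '\'' (by rw [hq2]; decide))
            have hpg := pvNotAt cs ['>'] j (by simp) hjl (pvNotOne cs j hjl '>' (by rw [hq2]; decide))
            rw [if_neg hq, if_pos hq2]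
            simp only [find_tag_end_alt_go]
            rw [pvFindAt cs ['"'] j (by simp) (by omega) ((pvPrefixOne cs '"' j hjl).mpr hq2)]
            rw [pvBest2 _ _ _ j hps hpg hpj]
            rw [if_neg (show ¬((j:Int) = -1) by omega)]
            rw [if_neg (show ¬((j:Int) = PySem.Chars.findFrom cs ['>'] (j:Int)) by
              rcases hpg with h | h <;> omega)]
            rw [if_neg (show ¬((j:Int) = PySem.Chars.findFrom cs ['{', '%'] (j:Int)) by
              rcases hpj with h | h <;> omega)]
            rw [pvGetAt cs j hjl]
            dsimp only []
            rw [hq2, e1, pvADouble cs fa (j+1) (by omega)]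
            by_cases hcl : PySem.Chars.findFrom cs ['"'] ((j+1 : Nat) : Int) = -1
            · rw [if_pos hcl, if_pos hcl]
            · rw [if_neg hcl, if_neg hcl]
              obtain ⟨hb1, hb2⟩ := pvFindBounds cs ['"'] (j+1) (by simp) (by omega) hcl
              rw [show PySem.Chars.findFrom cs ['"'] ((j+1 : Nat) : Int) + 1 =
                (((PySem.Chars.findFrom cs ['"'] ((j+1 : Nat) : Int)).toNat + 1 : Nat) : Int) by omega]
              exact ih _ fa fb (by omega) (by omega) (by omega)
          · by_cases hg : cs[j] = '>'
            · -- the tag closes at j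
              have hps := pvNotAt cs ['\''] j (by simp) hjl (pvNotOne cs j hjl '\'' (by rw [hg]; decide))
              have hpd := pvNotAt cs ['"'] j (by simp) hjl (pvNotOne cs j hjl '"' (by rw [hg]; decide))
              rw [if_neg hq, if_neg hq2, if_pos hg]
              simp only [find_tag_end_alt_go]
              rw [pvFindAt cs ['>'] j (by simp) (by omega) ((pvPrefixOne cs '>' j hjl).mpr hg)]
              rw [pvBest3 _ _ _ j hps hpd hpj]
              rw [if_neg (show ¬((j:Int) = -1) by omega), if_pos rfl]
            · -- an ordinary character: both sides move to j+1
              have hn1 := pvNotOne cs j hjl '\'' hq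
              have hn2 := pvNotOne cs j hjl '"' hq2
              have hn3 := pvNotOne cs j hjl '>' hg
              rw [if_neg hq, if_neg hq2, if_neg hg, e1,
                ih (j+1) fa (fb+1) (by omega) (by omega) (by omega)]
              exact (pvBskip cs (fb+1) j hjl hn1 hn2 hn3 hpjn).symm
    · rw [pvAbase cs fa j false false false (by omega), pvBbase cs fb j (by omega)]

-- ===== VERDICT (by name: the statement is the Claim_ definition above) =====
theorem find_tag_end_py_spec : Claim_equal_find_tag_end_py := by
  intro html start hdom hpre
  unfold Spec_find_tag_end_py find_tag_end_py find_tag_end_py_alt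
  unfold Pre_find_tag_end_py at hpre
  rw [show start + 1 = (((start + 1).toNat : Nat) : Int) by omega]
  exact pvMain html.toList (html.toList.length + 2) (start+1).toNat _ _ (by omega) (by omega) (by omega)
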